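-- pv_equiv track=rewrite | github.com/MrBrantCode/unitest_baseline | mut_generate/mist_train_taco/taco_6572/solution.py | generate_checkered_board
-- ===== SOURCE A (Python) =====
-- def generate_checkered_board(n):
--     # Validate input
--     if not isinstance(n, int) or n < 2:
--         return False
--
--     # Define the characters for dark and light squares
--     dark_square = '■'
--     light_square = '□'
--
--     # Generate the board
--     board = []
--     for x in range(n):
--         row = []
--         for y in range(n):
--             if (x + y) % 2 == n % 2:
--                 row.append(light_square)
--             else:
--                 row.append(dark_square)
--         board.append(' '.join(row))
--
--     # Join rows with newline characters and return the result
--     return '\n'.join(board)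
-- ===== SOURCE B (Python) =====
-- def generate_checkered_board(n):
--     if not isinstance(n, int) or n < 2:
--         return False
--     dark_square = '■'
--     light_square = '□'
--     even_row = ' '.join(light_square if y % 2 == n % 2 else dark_square for y in range(n))
--     odd_row = ' '.join(light_square if (y + 1) % 2 == n % 2 else dark_square for y in range(n))
--     return '\n'.join(even_row if x % 2 == 0 else odd_row for x in range(n))
-- ===== Notes on version B (the rewrite author's own statement) =====
-- stated objective: alternative
-- what changed: B precomputes the two possible row strings (even-row and odd-row templates) once and assembles the board by selecting a template per row parity, instead of A's nested per-cell recomputation.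
-- outside the precondition, e.g. on generate_checkered_board(1): A returns False, B returns False
import Mathlib
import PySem

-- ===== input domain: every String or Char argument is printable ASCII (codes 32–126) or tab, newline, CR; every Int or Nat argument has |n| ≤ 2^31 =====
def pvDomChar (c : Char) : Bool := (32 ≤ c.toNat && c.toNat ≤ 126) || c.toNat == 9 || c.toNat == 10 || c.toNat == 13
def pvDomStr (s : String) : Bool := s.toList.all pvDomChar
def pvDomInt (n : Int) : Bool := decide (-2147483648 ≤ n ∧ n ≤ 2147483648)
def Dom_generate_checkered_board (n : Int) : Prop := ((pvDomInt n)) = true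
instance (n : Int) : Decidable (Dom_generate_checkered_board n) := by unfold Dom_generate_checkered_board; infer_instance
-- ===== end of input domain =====

-- B precomputes one even-row and one odd-row template and selects by row parity,
-- instead of recomputing every cell: a different decomposition (objective: alternative).

-- ===== PORT A =====
-- inner loop: row.append(light/dark) per cell, then ' '.join(row)
def pvRowA (n x : Int) : String :=
  PySem.Str.join " "
    ((PySem.List.pyRange 0 n 1).foldl
      (fun row y =>
        row ++ [if PySem.Int.mod (x + y) 2 = PySem.Int.mod n 2 then "□" else "■"]) [])

def generate_checkered_board (n : Int) : String :=
  PySem.Str.join "\n"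
    ((PySem.List.pyRange 0 n 1).foldl (fun board x => board ++ [pvRowA n x]) [])

-- ===== PORT B =====
def generate_checkered_board_alt (n : Int) : String :=
  let even_row := PySem.Str.join " "
    ((PySem.List.pyRange 0 n 1).map
      (fun y => if PySem.Int.mod y 2 = PySem.Int.mod n 2 then "□" else "■"))
  let odd_row := PySem.Str.join " "
    ((PySem.List.pyRange 0 n 1).map
      (fun y => if PySem.Int.mod (y + 1) 2 = PySem.Int.mod n 2 then "□" else "■"))
  PySem.Str.join "\n"
    ((PySem.List.pyRange 0 n 1).map
      (fun x => if PySem.Int.mod x 2 = 0 then even_row else odd_row))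

-- ===== PRECONDITION & SPEC =====
-- Pre_ excludes n < 2, where Python A returns False (a bool, not a string).
def Pre_generate_checkered_board (n : Int) : Prop := 2 ≤ n
instance (n : Int) : Decidable (Pre_generate_checkered_board n) := by
  unfold Pre_generate_checkered_board; infer_instance

def pvWitness_generate_checkered_board : Int := 3

def Spec_generate_checkered_board (n : Int) (out : String) : Prop := out = generate_checkered_board_alt n
instance (n : Int) (out : String) : Decidable (Spec_generate_checkered_board n out) := by
  unfold Spec_generate_checkered_board; infer_instance

-- ===== CLAIM (what is proved, stated in full; the proofs are below) =====
def Claim_equal_generate_checkered_board : Prop := ∀ (n : Int), Dom_generate_checkered_board n → Pre_generate_checkered_board n → Spec_generate_checkered_board n (generate_checkered_board n)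

-- ===== LEMMAS AND PROOFS =====

-- A's row x is B's even template when x is even, the odd template otherwise.
theorem pvRowA_eq (n x : Int) :
    pvRowA n x =
      (if PySem.Int.mod x 2 = 0 then
        PySem.Str.join " "
          ((PySem.List.pyRange 0 n 1).map
            (fun y => if PySem.Int.mod y 2 = PySem.Int.mod n 2 then "□" else "■"))
      else
        PySem.Str.join " "
          ((PySem.List.pyRange 0 n 1).map
            (fun y => if PySem.Int.mod (y + 1) 2 = PySem.Int.mod n 2 then "□" else "■"))) := by
  unfold pvRowA
  rw [PySem.List.foldl_append_singleton_eq_map]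
  have h2 : (0:Int) < 2 := by omega
  by_cases hx : PySem.Int.mod x 2 = 0
  · simp only [hx, if_true]
    refine congrArg _ (List.map_congr_left ?_)
    intro y _
    have := PySem.Int.mod_eq_emod_of_pos (a := x + y) h2
    have := PySem.Int.mod_eq_emod_of_pos (a := x) h2
    have := PySem.Int.mod_eq_emod_of_pos (a := y) h2
    have := PySem.Int.mod_eq_emod_of_pos (a := n) h2
    have hcell : PySem.Int.mod (x + y) 2 = PySem.Int.mod y 2 := by omega
    rw [hcell]
  · simp only [hx, if_false]
    refine congrArg _ (List.map_congr_left ?_)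
    intro y _
    have := PySem.Int.mod_eq_emod_of_pos (a := x + y) h2
    have := PySem.Int.mod_eq_emod_of_pos (a := x) h2
    have := PySem.Int.mod_eq_emod_of_pos (a := y + 1) h2
    have := PySem.Int.mod_eq_emod_of_pos (a := n) h2
    have hcell : PySem.Int.mod (x + y) 2 = PySem.Int.mod (y + 1) 2 := by omega
    rw [hcell]

-- ===== VERDICT (by name: the statement is the Claim_ definition above) =====
theorem generate_checkered_board_spec : Claim_equal_generate_checkered_board := by
  intro n _ _
  unfold Spec_generate_checkered_board generate_checkered_board generate_checkered_board_alt
  rw [PySem.List.foldl_append_singleton_eq_map]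
  exact congrArg _ (List.map_congr_left fun x _ => pvRowA_eq n x)
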